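-- pv_equiv track=rewrite | github.com/LeoMash/AoC | py/2025/2/2.py | is_valid_p
-- ===== SOURCE A (Python) =====
-- def is_valid_p(x, n, p):
--     if n % p != 0:
--         return True
--     pl = n // p
--     fp = x[:pl]
--     for ii in range(1, p):
--         xp = x[ii * pl:(ii + 1) * pl]
--         if fp != xp:
--             return True
--     return False
-- ===== SOURCE B (Python) =====
-- def is_valid_p(x, n, p):
--     if n % p != 0:
--         return True
--     pl = n // p
--     head = x[:n]
--     fp = x[:pl]
--     return len(head) != len(fp) * p or head != fp * p
-- ===== Notes on version B (the rewrite author's own statement) =====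
-- stated objective: simpler
-- what changed: Replaces A's explicit chunk-by-chunk comparison loop with one closed-form check: the first n elements must equal the first chunk repeated p times.
-- outside the precondition, e.g. on is_valid_p([1, 2], 2, -1): A returns False, B returns True; on is_valid_p([1, 2, 1, 2], 4, 0): A raises ZeroDivisionError, B raises ZeroDivisionError
import Mathlib
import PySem

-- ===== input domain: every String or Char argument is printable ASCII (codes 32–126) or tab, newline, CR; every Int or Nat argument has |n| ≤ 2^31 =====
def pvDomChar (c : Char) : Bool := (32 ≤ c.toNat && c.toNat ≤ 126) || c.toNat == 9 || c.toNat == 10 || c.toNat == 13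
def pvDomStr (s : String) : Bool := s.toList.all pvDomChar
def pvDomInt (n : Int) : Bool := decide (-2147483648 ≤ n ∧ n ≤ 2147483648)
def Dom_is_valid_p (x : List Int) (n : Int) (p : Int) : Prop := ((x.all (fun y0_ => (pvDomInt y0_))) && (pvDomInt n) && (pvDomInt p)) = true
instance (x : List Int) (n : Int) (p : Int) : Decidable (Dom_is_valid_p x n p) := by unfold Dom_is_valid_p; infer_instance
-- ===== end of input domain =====

-- B replaces A's chunk-comparison loop by the closed-form check x[:n] != x[:pl] * p (simpler, same cost).


-- ===== PORT A =====
-- A's `for ii in range(1, p)` with early `return True`, as a structural recursion over ii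
def is_valid_p_loop (x fp : List Int) (pl p ii : Int) : Bool :=
  if ii < p then
    if fp ≠ PySem.List.slice x (some (ii * pl)) (some ((ii + 1) * pl)) then
      true
    else
      is_valid_p_loop x fp pl p (ii + 1)
  else
    false
termination_by (p - ii).toNat
decreasing_by omega

def is_valid_p (x : List Int) (n : Int) (p : Int) : Bool :=
  if PySem.Int.mod n p ≠ 0 then
    true
  else
    let pl := PySem.Int.floordiv n p
    let fp := PySem.List.slice x none (some pl)
    is_valid_p_loop x fp pl p 1

-- ===== PORT B =====
def is_valid_p_alt (x : List Int) (n : Int) (p : Int) : Bool :=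
  if PySem.Int.mod n p ≠ 0 then
    true
  else
    let pl := PySem.Int.floordiv n p
    let head := PySem.List.slice x none (some n)
    let fp := PySem.List.slice x none (some pl)
    -- Python's `fp * p` is p concatenated copies (and empty for p ≤ 0): flatten (replicate p.toNat fp), exact for every p
    if (head.length : Int) ≠ (fp.length : Int) * p then
      true
    else
      decide (head ≠ (List.replicate p.toNat fp).flatten)

-- ===== PRECONDITION & SPEC =====
-- Pre_ excludes p = 0, on which A raises ZeroDivisionError, and non-positive p dividing n, which lies outside
-- the natural domain of a chunk count and on which A's empty comparison loop incidentally returns False.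
def Pre_is_valid_p (x : List Int) (n : Int) (p : Int) : Prop := 1 ≤ p ∨ (p ≠ 0 ∧ PySem.Int.mod n p ≠ 0)
instance (x : List Int) (n : Int) (p : Int) : Decidable (Pre_is_valid_p x n p) := by unfold Pre_is_valid_p; infer_instance
def pvWitness_is_valid_p : List Int × Int × Int := ([1, 2, 1, 2], 4, 2)
def Spec_is_valid_p (x : List Int) (n : Int) (p : Int) (out : Bool) : Prop := out = is_valid_p_alt x n p
instance (x : List Int) (n : Int) (p : Int) (out : Bool) : Decidable (Spec_is_valid_p x n p out) := by unfold Spec_is_valid_p; infer_instance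

-- ===== CLAIM (what is proved, stated in full; the proofs are below) =====
def Claim_equal_is_valid_p : Prop := ∀ (x : List Int) (n : Int) (p : Int), Dom_is_valid_p x n p → Pre_is_valid_p x n p → Spec_is_valid_p x n p (is_valid_p x n p)

-- ===== LEMMAS AND PROOFS =====

-- clampIdx on a negative index is (length + i).toNat
theorem pv_clampIdx_neg (m : Nat) (i : Int) (hi : i < 0) :
    PySem.List.clampIdx m i = ((m : Int) + i).toNat := by
  unfold PySem.List.clampIdx
  split_ifs with h1 h2 <;> omega

-- x[:b] is take (clampIdx len b)
theorem pv_slice_to_clamp {α : Type} (x : List α) (b : Int) :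
    PySem.List.slice x none (some b) = x.take (PySem.List.clampIdx x.length b) := by
  unfold PySem.List.slice
  simp

-- length of q concatenated copies
theorem pv_len_flat (q : Nat) (l : List Int) :
    ((List.replicate q l).flatten).length = q * l.length := by
  simp [List.length_flatten, List.map_replicate, List.sum_replicate, smul_eq_mul]

-- the Nat-level core, full case: every chunk fits in x
theorem pv_full (a : Nat) : ∀ (q : Nat) (x : List Int) (fp : List Int),
    fp.length = a → a * q ≤ x.length →
    (x.take (a * q) = (List.replicate q fp).flatten ↔ ∀ i < q, (x.drop (i * a)).take a = fp) := by
  intro q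
  induction q with
  | zero => intro x fp _ _; simp
  | succ q ih =>
    intro x fp hfp hlen
    have hax : a ≤ x.length := by nlinarith
    have h1 : a * (q + 1) = a + a * q := by ring
    have htk : x.take (a * (q + 1)) = x.take a ++ (x.drop a).take (a * q) := by
      rw [h1, List.take_add]
    have hlen' : a * q ≤ (x.drop a).length := by
      simp [List.length_drop]; omega
    have hIH := ih (x.drop a) fp hfp hlen'
    constructor
    · intro h i hi
      have hsplit : x.take a = fp ∧ (x.drop a).take (a * q) = (List.replicate q fp).flatten := by
        apply List.append_inj
        · rw [← htk, h]; simp [List.replicate_succ]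
        · simp [List.length_take, hfp]; omega
      cases i with
      | zero => simpa using hsplit.1
      | succ i =>
        have h2 := (hIH.mp hsplit.2) i (by omega)
        rw [List.drop_drop] at h2
        have he : a + i * a = (i + 1) * a := by ring
        rwa [he] at h2
    · intro h
      have h0 : x.take a = fp := by simpa using h 0 (by omega)
      have hrest : (x.drop a).take (a * q) = (List.replicate q fp).flatten := by
        apply hIH.mpr
        intro i hi
        have hh := h (i + 1) (by omega)
        rw [List.drop_drop]
        have he : a + i * a = (i + 1) * a := by ring
        rw [he]
        exact hh
      rw [htk, h0, hrest]
      simp [List.replicate_succ]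

-- the Nat-level core, general: x.take (a*q) equals q copies of x.take a iff every later chunk equals the first
theorem pv_natCore (x : List Int) (a q : Nat) (hq : 1 ≤ q) :
    (x.take (a * q) = (List.replicate q (x.take a)).flatten ↔
      ∀ i, 1 ≤ i → i < q → (x.drop (i * a)).take a = x.take a) := by
  by_cases hfull : a * q ≤ x.length
  · have hax : a ≤ x.length := le_trans (Nat.le_mul_of_pos_right a (by omega)) hfull
    have hfp : (x.take a).length = a := by simp [List.length_take]; omega
    rw [pv_full a q x (x.take a) hfp hfull]
    constructor
    · intro h i _ h2; exact h i h2
    · intro h i hi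
      cases i with
      | zero => simp
      | succ i => exact h (i + 1) (by omega) hi
  · push_neg at hfull
    rcases Nat.eq_or_lt_of_le hq with hq1 | hq2
    · -- q = 1 : both sides trivially true
      rw [← hq1]
      simp
      intro i h1 h2
      omega
    · -- q ≥ 2
      have ha1 : 1 ≤ a := by
        by_contra h
        push_neg at h
        interval_cases a <;> omega
      by_cases hma : x.length ≤ a
      · -- the first chunk is all of x; later chunks are empty
        have hfp : x.take a = x := List.take_of_length_le (by omega)
        have hchunk : ∀ i, 1 ≤ i → (x.drop (i * a)).take a = [] := by
          intro i hi
          have hd : x.drop (i * a) = [] := by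
            apply List.drop_eq_nil_of_le
            exact le_trans hma (Nat.le_mul_of_pos_left a (by omega))
          simp [hd]
        constructor
        · intro h i h1 _
          rw [hchunk i h1, hfp]
          by_contra hne
          have hxne : x ≠ [] := fun hx => hne (by simp [hx])
          have hmx : 1 ≤ x.length := List.length_pos_of_ne_nil hxne
          have heq := congrArg List.length h
          rw [hfp, pv_len_flat] at heq
          simp only [List.length_take] at heq
          have hmin : min (a * q) x.length = x.length := by omega
          rw [hmin] at heq
          nlinarith
        · intro h
          have h1 := h 1 (by omega) (by omega)
          rw [hchunk 1 (by omega), hfp] at h1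
          have hx : x = [] := h1.symm
          simp [hx]
      · -- a < x.length < a * q : lengths disagree on both sides
        push_neg at hma
        have hfp : (x.take a).length = a := by simp [List.length_take]; omega
        constructor
        · intro h
          exfalso
          have heq := congrArg List.length h
          rw [pv_len_flat] at heq
          simp only [List.length_take] at heq
          have h2 : min a x.length = a := by omega
          rw [h2, Nat.mul_comm q a] at heq
          have h1 : min (a * q) x.length = x.length := by omega
          rw [h1] at heq
          omega
        · intro h
          exfalso
          have hlast := h (q - 1) (by omega) (by omega)
          have hlc : ((x.drop ((q - 1) * a)).take a).length = min a (x.length - (q - 1) * a) := by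
            simp [List.length_take, List.length_drop]
          have hqa : a * q = a * (q - 1) + a := by
            have hq' : q = (q - 1) + 1 := by omega
            calc a * q = a * ((q - 1) + 1) := by rw [← hq']
              _ = a * (q - 1) + a := by ring
          have h3 : a * (q - 1) = (q - 1) * a := Nat.mul_comm _ _
          have hlt : x.length - (q - 1) * a < a := by omega
          have hle : ((x.drop ((q - 1) * a)).take a).length = (x.take a).length := by rw [hlast]
          rw [hlc, hfp] at hle
          omega
-- A's loop helper is the any-of-range it folds into
theorem pv_loop_eq_any (x fp : List Int) (pl p : Int) (ii : Int) :
    is_valid_p_loop x fp pl p ii =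
      (PySem.List.pyRange ii p).any
        (fun j => decide (fp ≠ PySem.List.slice x (some (j * pl)) (some ((j + 1) * pl)))) := by
  generalize hk : (p - ii).toNat = k
  induction k generalizing ii with
  | zero =>
    have h : ¬ ii < p := by omega
    rw [is_valid_p_loop, PySem.List.pyRange_one_eq_nil (by omega)]
    simp [h]
  | succ k ihk =>
    have h : ii < p := by omega
    rw [is_valid_p_loop, PySem.List.pyRange_one_cons h]
    simp only [if_pos h, List.any_cons]
    by_cases hne : fp ≠ PySem.List.slice x (some (ii * pl)) (some ((ii + 1) * pl))
    · simp [hne]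
    · simp only [if_neg hne]
      rw [ihk (ii + 1) (by omega)]
      simp [hne]

-- the Int-level core: the closed-form equality iff every chunk of A's loop equals the first chunk
theorem pv_core (x : List Int) (pl p : Int) (hp : 1 ≤ p) :
    (PySem.List.slice x none (some (pl * p)) =
        (List.replicate p.toNat (PySem.List.slice x none (some pl))).flatten ↔
      ∀ ii : Int, 1 ≤ ii → ii < p →
        PySem.List.slice x (some (ii * pl)) (some ((ii + 1) * pl)) =
          PySem.List.slice x none (some pl)) := by
  by_cases hpl : 0 ≤ pl
  · -- nonnegative chunk length: reduce to the Nat statement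
    obtain ⟨a, rfl⟩ : ∃ a : Nat, pl = (a : Int) := ⟨pl.toNat, by omega⟩
    obtain ⟨q, rfl⟩ : ∃ q : Nat, p = (q : Int) := ⟨p.toNat, by omega⟩
    have hq : 1 ≤ q := by exact_mod_cast hp
    have hLHS : PySem.List.slice x none (some ((a : Int) * q)) = x.take (a * q) := by
      rw [show ((a : Int) * q) = ((a * q : Nat) : Int) by push_cast; ring,
        PySem.List.slice_to x (by positivity)]
      rw [Int.toNat_natCast]
    have hfp : PySem.List.slice x none (some (a : Int)) = x.take a := by
      rw [PySem.List.slice_to x (by positivity)]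
      rw [Int.toNat_natCast]
    have htoq : ((q : Int)).toNat = q := Int.toNat_natCast q
    rw [hLHS, hfp, htoq, pv_natCore x a q hq]
    constructor
    · intro h ii h1 h2
      obtain ⟨i, rfl⟩ : ∃ i : Nat, ii = (i : Int) := ⟨ii.toNat, by omega⟩
      rw [show (i : Int) * a = ((i * a : Nat) : Int) by push_cast; ring,
          show ((i : Int) + 1) * a = (((i + 1) * a : Nat) : Int) by push_cast; ring,
          PySem.List.slice_toNat x (by positivity) (by positivity)]
      simp only [Int.toNat_natCast]
      rw [show (i + 1) * a - i * a = a by rw [Nat.succ_mul]; omega]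
      exact h i (by exact_mod_cast h1) (by exact_mod_cast h2)
    · intro h i h1 h2
      have hc := h (i : Int) (by exact_mod_cast h1) (by exact_mod_cast h2)
      rw [show (i : Int) * a = ((i * a : Nat) : Int) by push_cast; ring,
          show ((i : Int) + 1) * a = (((i + 1) * a : Nat) : Int) by push_cast; ring,
          PySem.List.slice_toNat x (by positivity) (by positivity)] at hc
      simp only [Int.toNat_natCast] at hc
      rwa [show (i + 1) * a - i * a = a by rw [Nat.succ_mul]; omega] at hc
  · -- negative chunk length: every later chunk of A's loop is empty
    push_neg at hpl
    by_cases hp1 : p = 1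
    · subst hp1
      constructor
      · intro _ ii h1 h2; omega
      · intro _
        simp [mul_one]
    · have hp2 : 2 ≤ p := by omega
      have hchunk : ∀ ii : Int, 1 ≤ ii →
          PySem.List.slice x (some (ii * pl)) (some ((ii + 1) * pl)) = [] := by
        intro ii hii
        apply List.eq_nil_of_length_eq_zero
        rw [PySem.List.length_slice]
        have hlt1 : ii * pl < 0 := by nlinarith
        have hlt2 : (ii + 1) * pl < 0 := by nlinarith
        have hle : (ii + 1) * pl ≤ ii * pl := by nlinarith
        rw [pv_clampIdx_neg x.length _ hlt1, pv_clampIdx_neg x.length _ hlt2]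
        omega
      have hplp : pl * p < 0 := by nlinarith
      have hfp : PySem.List.slice x none (some pl) = x.take (((x.length : Int) + pl).toNat) := by
        rw [pv_slice_to_clamp x pl, pv_clampIdx_neg x.length pl hpl]
      have hLHS : PySem.List.slice x none (some (pl * p)) =
          x.take (((x.length : Int) + pl * p).toNat) := by
        rw [pv_slice_to_clamp x (pl * p), pv_clampIdx_neg x.length (pl * p) hplp]
      by_cases hL0 : ((x.length : Int) + pl).toNat = 0
      · -- first chunk empty: both sides hold
        have hK0 : ((x.length : Int) + pl * p).toNat = 0 := by
          have hle : pl * p ≤ pl := by nlinarith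
          omega
        constructor
        · intro _ ii h1 _
          rw [hchunk ii h1, hfp, hL0]
          simp
        · intro _
          rw [hLHS, hfp, hK0, hL0]
          simp
      · -- first chunk nonempty: both sides fail
        have hL1 : 1 ≤ ((x.length : Int) + pl).toNat := by omega
        have hKL : ((x.length : Int) + pl * p).toNat < ((x.length : Int) + pl).toNat := by
          have h2p : pl * p ≤ 2 * pl := by nlinarith
          omega
        constructor
        · intro h
          exfalso
          rw [hLHS, hfp] at h
          have heq := congrArg List.length h
          rw [pv_len_flat] at heq
          simp only [List.length_take] at heq
          have hq2 : 2 ≤ p.toNat := by omega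
          have hLlen : min (((x.length : Int) + pl).toNat) x.length =
              ((x.length : Int) + pl).toNat := by omega
          rw [hLlen] at heq
          have hKlen : min (((x.length : Int) + pl * p).toNat) x.length =
              ((x.length : Int) + pl * p).toNat := by omega
          rw [hKlen] at heq
          nlinarith
        · intro h
          exfalso
          have h1 := h 1 (by omega) (by omega)
          rw [hchunk 1 (by omega), hfp] at h1
          have hlen := congrArg List.length h1
          simp only [List.length_nil, List.length_take] at hlen
          omega

-- B's length fast-path never changes the closed-form comparison's verdict (for 1 ≤ p)
theorem pv_guard_collapse (x : List Int) (nn pl p : Int) (hp : 1 ≤ p) :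
    (if ((PySem.List.slice x none (some nn)).length : Int) ≠
        ((PySem.List.slice x none (some pl)).length : Int) * p then
      true
    else
      decide (PySem.List.slice x none (some nn) ≠
        (List.replicate p.toNat (PySem.List.slice x none (some pl))).flatten)) =
    decide (PySem.List.slice x none (some nn) ≠
      (List.replicate p.toNat (PySem.List.slice x none (some pl))).flatten) := by
  split_ifs with hlen
  · symm
    rw [decide_eq_true_iff]
    intro hEQ
    apply hlen
    rw [congrArg List.length hEQ, pv_len_flat]
    push_cast
    rw [Int.toNat_of_nonneg (by omega)]
    ring
  · rfl

-- ===== VERDICT (by name: the statement is the Claim_ definition above) =====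
theorem is_valid_p_spec : Claim_equal_is_valid_p := by
  intro x n p _ hpre
  unfold Pre_is_valid_p at hpre
  unfold Spec_is_valid_p is_valid_p is_valid_p_alt
  by_cases hmod : PySem.Int.mod n p = 0
  · have hp1 : 1 ≤ p := hpre.resolve_right fun h => h.2 hmod
    simp only [hmod, ne_eq, not_true_eq_false, if_false]
    set pl := PySem.Int.floordiv n p with hpl
    have hn : pl * p = n := by
      have hdm := PySem.Int.floordiv_mul_add_mod n p
      rw [hmod] at hdm
      simpa using hdm
    rw [← hn]
    rw [pv_loop_eq_any]
    rw [pv_guard_collapse x (pl * p) pl p hp1]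
    rw [Bool.eq_iff_iff]
    simp only [List.any_eq_true, decide_eq_true_eq, PySem.List.mem_pyRange_one]
    have hiff := pv_core x pl p hp1
    constructor
    · rintro ⟨ii, ⟨h1, h2⟩, hne⟩ hEQ
      exact hne ((hiff.mp hEQ ii h1 h2).symm)
    · intro hne
      by_contra hno
      push_neg at hno
      exact hne (hiff.mpr fun ii h1 h2 => (hno ii ⟨h1, h2⟩).symm)
  · simp [hmod]
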